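-- pv_equiv track=rewrite | github.com/zulufun/CA_Manager | backend/migrate_v1_to_v2.py | extract_cn_from_subject
-- ===== SOURCE A (Python) =====
-- def extract_cn_from_subject(subject):
--     """Extract CN from X.509 subject string"""
--     if not subject:
--         return None
--     for part in subject.replace('/', ',').split(','):
--         part = part.strip()
--         if part.upper().startswith('CN='):
--             return part[3:].strip()
--     return None
-- ===== SOURCE B (Python) =====
-- def _split_field(t):
--     """Split t at its first ',' or '/': (field, remainder-after-separator, found?)."""
--     for i, c in enumerate(t):
--         if c in ',/':
--             return t[:i], t[i + 1:], True
--     return t, '', False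
--
--
-- def extract_cn_from_subject(subject):
--     """Extract CN from X.509 subject string"""
--     if not subject:
--         return None
--     s = subject
--     while True:
--         field, rest, more = _split_field(s.lstrip())
--         if field[:3].upper() == 'CN=':
--             return field[3:].strip()
--         if not more:
--             return None
--         s = rest
-- ===== Notes on version B (the rewrite author's own statement) =====
-- stated objective: alternative
-- what changed: Replaces A's pipeline (rewrite slashes to commas, split the whole string into a list of parts, strip and test each) by a single left-to-right field scan that lstrips, cuts the field at the next separator character, tests its first three characters case-insensitively and advances past the separator.
import Mathlib
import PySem

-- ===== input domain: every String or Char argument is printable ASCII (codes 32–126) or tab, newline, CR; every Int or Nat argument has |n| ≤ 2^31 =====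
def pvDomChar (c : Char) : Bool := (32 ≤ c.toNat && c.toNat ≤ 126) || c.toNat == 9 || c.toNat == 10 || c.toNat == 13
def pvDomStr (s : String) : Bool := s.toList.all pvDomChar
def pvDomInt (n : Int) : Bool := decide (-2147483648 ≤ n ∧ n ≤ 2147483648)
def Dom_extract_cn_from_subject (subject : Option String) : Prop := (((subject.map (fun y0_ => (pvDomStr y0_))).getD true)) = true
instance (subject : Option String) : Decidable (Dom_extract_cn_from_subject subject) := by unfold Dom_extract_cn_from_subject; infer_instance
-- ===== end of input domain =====

-- B replaces A's rewrite-separators-then-split-then-strip-each-part pipeline by a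
-- single left-to-right field scan (lstrip, cut the field at the next separator,
-- case-insensitive 3-character prefix test, advance); same cost, different structure.


-- ===== PORT A =====
def cnPrefix : List Char := ['C', 'N', '=']

-- the 'for part in …split(','):' loop of A: first matching part wins
def loopA : List (List Char) → Option (List Char)
  | [] => none
  | p :: rest =>
    let part := PySem.Chars.strip p
    if PySem.Chars.startswith (PySem.Chars.upper part) cnPrefix then
      some (PySem.Chars.strip (PySem.Chars.slice part (some 3) none))
    else loopA rest

def extract_cn_from_subject (subject : Option String) : Option String :=
  match subject with
  | none => none
  | some s =>
    if s.toList.isEmpty then none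
    else
      (loopA (PySem.Chars.splitOn (PySem.Chars.replace s.toList ['/'] [',']) [','])).map String.ofList

-- ===== PORT B =====
-- port of Source B's _split_field: (field, remainder after the separator, separator found?)
def splitField : List Char → List Char × List Char × Bool
  | [] => ([], [], false)
  | c :: t =>
    if c == ',' || c == '/' then ([], t, true)
    else
      let r := splitField t
      (c :: r.1, r.2.1, r.2.2)

-- termination helper for scanB (cited in decreasing_by)
theorem splitField_rest_length_lt (t : List Char) (h : (splitField t).2.2 = true) :
    (splitField t).2.1.length < t.length := by
  induction t with
  | nil => simp [splitField] at h
  | cons c t ih =>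
    by_cases hc : (c == ',' || c == '/') = true
    · simp [splitField, hc]
    · simp only [splitField, hc, if_neg, Bool.not_eq_true] at *
      simp only [List.length_cons]
      exact Nat.lt_succ_of_lt (ih h)

-- port of Source B's while-loop
def scanB (l : List Char) : Option (List Char) :=
  let t := l.dropWhile PySem.Chars.isspace
  let r := splitField t
  if PySem.Chars.upper (r.1.take 3) = cnPrefix then
    some (PySem.Chars.strip (r.1.drop 3))
  else if hm : r.2.2 = true then scanB r.2.1
  else none
termination_by l.length
decreasing_by
  exact Nat.lt_of_lt_of_le (splitField_rest_length_lt _ hm)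
    (List.length_dropWhile_le _ _)

def extract_cn_from_subject_alt (subject : Option String) : Option String :=
  match subject with
  | none => none
  | some s =>
    if s.toList.isEmpty then none
    else (scanB s.toList).map String.ofList

-- ===== PRECONDITION & SPEC =====
def Spec_extract_cn_from_subject (subject : Option String) (out : Option String) : Prop := out = extract_cn_from_subject_alt subject
instance (subject : Option String) (out : Option String) : Decidable (Spec_extract_cn_from_subject subject out) := by unfold Spec_extract_cn_from_subject; infer_instance

-- ===== CLAIM (what is proved, stated in full; the proofs are below) =====
def Claim_equal_extract_cn_from_subject : Prop := ∀ (subject : Option String), Dom_extract_cn_from_subject subject → Spec_extract_cn_from_subject subject (extract_cn_from_subject subject)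

-- ===== LEMMAS AND PROOFS =====

-- '/' → ',' substitution performed by A's replace
def subSlash (c : Char) : Char := if c == '/' then ',' else c

-- reference split of A's rewritten string on ','
def splitC : List Char → List (List Char)
  | [] => [[]]
  | c :: t =>
    if c == ',' then [] :: splitC t
    else
      match splitC t with
      | [] => [[c]]
      | p :: ps => (c :: p) :: ps

def notsep (c : Char) : Bool := !(c == ',' || c == '/')

theorem replace_go_eq (l : List Char) : ∀ (fuel : Nat) (acc : List Char), l.length ≤ fuel →
    PySem.Chars.replace.go ['/'] [','] fuel l acc = acc.reverse ++ l.map subSlash := by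
  induction l with
  | nil => intro fuel acc _; cases fuel <;> simp [PySem.Chars.replace.go]
  | cons c t ih =>
    intro fuel acc hf
    cases fuel with
    | zero => simp at hf
    | succ f =>
      simp only [PySem.Chars.replace.go]
      by_cases hc : c = '/'
      · subst hc
        simp only [List.isPrefixOf, List.length_cons] at *
        simp [ih f _ (by omega), subSlash]
      · have : (['/'].isPrefixOf (c :: t)) = false := by
          simp [List.isPrefixOf]; exact fun h => hc h.symm
        simp only [this, Bool.false_eq_true, if_neg, not_false_iff]
        rw [ih f _ (by simpa using Nat.le_of_succ_le_succ hf)]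
        simp [subSlash, hc]

theorem replace_eq (l : List Char) :
    PySem.Chars.replace l ['/'] [','] = l.map subSlash := by
  simp [PySem.Chars.replace, replace_go_eq l l.length [] le_rfl]

theorem splitC_ne_nil (l : List Char) : splitC l ≠ [] := by
  cases l with
  | nil => simp [splitC]
  | cons c t =>
    simp only [splitC]
    by_cases hc : (c == ',') = true
    · simp [hc]
    · simp only [hc, Bool.false_eq_true, if_neg, not_false_iff]
      cases h : splitC t <;> simp

theorem splitOn_go_eq (l : List Char) : ∀ (fuel : Nat) (cur : List Char) (acc : List (List Char)),
    l.length < fuel →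
    PySem.Chars.splitOn.go [','] fuel l cur acc
      = acc.reverse ++ List.modifyHead (cur.reverse ++ ·) (splitC l) := by
  induction l with
  | nil =>
    intro fuel cur acc hf
    cases fuel with
    | zero => omega
    | succ f => simp [PySem.Chars.splitOn.go, splitC]
  | cons c t ih =>
    intro fuel cur acc hf
    cases fuel with
    | zero => omega
    | succ f =>
      simp only [PySem.Chars.splitOn.go]
      by_cases hc : c = ','
      · subst hc
        have hp : ([','].isPrefixOf (',' :: t)) = true := by simp [List.isPrefixOf]
        simp only [hp, if_pos]
        show PySem.Chars.splitOn.go [','] f t [] (cur.reverse :: acc) = _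
        rw [ih f [] _ (by simpa using Nat.lt_of_succ_lt_succ hf)]
        simp only [splitC]
        cases splitC t <;> simp
      · have hp : ([','].isPrefixOf (c :: t)) = false := by
          simp [List.isPrefixOf]; exact fun h => hc h.symm
        simp only [hp, Bool.false_eq_true, if_neg, not_false_iff]
        rw [ih f (c :: cur) acc (by simpa using Nat.lt_of_succ_lt_succ hf)]
        have hcc : (c == ',') = false := by simpa using hc
        simp only [splitC, hcc, Bool.false_eq_true, if_neg, not_false_iff]
        cases h : splitC t with
        | nil => exact absurd h (splitC_ne_nil t)
        | cons p ps => simp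

theorem splitOn_eq (l : List Char) :
    PySem.Chars.splitOn l [','] = splitC l := by
  rw [PySem.Chars.splitOn, splitOn_go_eq l (l.length + 1) [] [] (by omega)]
  cases h : splitC l with
  | nil => exact absurd h (splitC_ne_nil l)
  | cons p ps => simp

theorem splitC_eq (m : List Char) :
    splitC m = m.takeWhile (· != ',')
      :: (match m.dropWhile (· != ',') with
          | [] => []
          | _ :: t => splitC t) := by
  induction m with
  | nil => simp [splitC]
  | cons c t ih =>
    by_cases hc : (c == ',') = true
    · have hb : (c != ',') = false := by simpa using hc
      simp [splitC, hc, List.takeWhile, List.dropWhile, hb]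
    · simp only [splitC, hc, Bool.false_eq_true, if_neg, not_false_iff]
      rw [ih]
      have : (c != ',') = true := by simpa using hc
      simp [List.takeWhile, List.dropWhile, this]

theorem splitField_eq (t : List Char) :
    splitField t = (t.takeWhile notsep, (t.dropWhile notsep).tail, !(t.dropWhile notsep).isEmpty) := by
  induction t with
  | nil => simp [splitField]
  | cons c t ih =>
    by_cases hc : (c == ',' || c == '/') = true
    · simp [splitField, hc, List.takeWhile, List.dropWhile, notsep]
    · have hn : notsep c = true := by simp [notsep, hc]
      simp [splitField, hc, ih, List.takeWhile, List.dropWhile, hn]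

theorem pred_sub_eq : ((fun c => c != ',') ∘ subSlash) = notsep := by
  funext c
  by_cases h1 : c = '/'
  · subst h1; rfl
  · by_cases h2 : c = ','
    · subst h2; rfl
    · have e1 : (c == ',') = false := beq_eq_false_iff_ne.mpr h2
      have e2 : (c == '/') = false := beq_eq_false_iff_ne.mpr h1
      simp [notsep, subSlash, bne, e1, e2]

theorem map_sub_id (x : List Char) (hx : ∀ c ∈ x, notsep c = true) : x.map subSlash = x := by
  induction x with
  | nil => rfl
  | cons c t ih =>
    have h := hx c (by simp)
    simp only [notsep, Bool.not_eq_eq_eq_not, Bool.not_true, Bool.or_eq_false_iff,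
      beq_eq_false_iff_ne, ne_eq] at h
    simp only [List.map_cons, subSlash]
    rw [if_neg (by simpa using h.2), ih (fun c hc => hx c (by simp [hc]))]

theorem takeWhile_map_sub (l : List Char) :
    (l.map subSlash).takeWhile (· != ',') = (l.takeWhile notsep).map subSlash := by
  rw [List.takeWhile_map, pred_sub_eq]

theorem dropWhile_map_sub (l : List Char) :
    (l.map subSlash).dropWhile (· != ',') = (l.dropWhile notsep).map subSlash := by
  rw [List.dropWhile_map, pred_sub_eq]

theorem isspace_notsep (c : Char) (h : PySem.Chars.isspace c = true) : notsep c = true := by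
  simp only [notsep, Bool.not_eq_eq_eq_not, Bool.not_true, Bool.or_eq_false_iff,
    beq_eq_false_iff_ne, ne_eq]
  constructor <;> · rintro rfl; exact absurd h (by decide)

theorem upperChar_of_isspace (c : Char) (h : PySem.Chars.isspace c = true) :
    PySem.Chars.upperChar c = c := by
  have hl : PySem.Chars.islower c = false := by
    simp only [PySem.Chars.isspace, Char.toNat] at h
    simp only [PySem.Chars.islower, Bool.and_eq_false_iff, decide_eq_false_iff_not, Char.le_def]
    revert h
    simp only [Bool.or_eq_true, Bool.and_eq_true, decide_eq_true_eq]
    intro h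
    by_contra hc
    rw [not_or] at hc
    obtain ⟨h1, h2⟩ := hc
    rw [not_not] at h1 h2
    change (97 : UInt32) ≤ c.val at h1
    change c.val ≤ (122 : UInt32) at h2
    have hv1 : 97 ≤ c.val.toNat := by exact_mod_cast h1
    have hv2 : c.val.toNat ≤ 122 := by exact_mod_cast h2
    omega
  simp [PySem.Chars.upperChar, hl]

theorem lstrip_takeWhile (l : List Char) :
    (l.takeWhile notsep).dropWhile PySem.Chars.isspace
      = (l.dropWhile PySem.Chars.isspace).takeWhile notsep := by
  induction l with
  | nil => simp
  | cons c t ih =>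
    by_cases hs : PySem.Chars.isspace c = true
    · have hn := isspace_notsep c hs
      simp [List.takeWhile_cons, List.dropWhile_cons, hn, hs, ih]
    · by_cases hn : notsep c = true
      · simp [List.takeWhile_cons, List.dropWhile_cons, hn, hs]
      · simp [List.takeWhile_cons, List.dropWhile_cons, hn, hs]

theorem dropWhile_notsep_dropWhile_isspace (l : List Char) :
    (l.dropWhile PySem.Chars.isspace).dropWhile notsep = l.dropWhile notsep := by
  induction l with
  | nil => simp
  | cons c t ih =>
    by_cases hs : PySem.Chars.isspace c = true
    · have hn := isspace_notsep c hs
      simp [List.dropWhile_cons, hn, hs, ih]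
    · simp [List.dropWhile_cons, hs]

theorem rstrip_decomp (g : List Char) :
    ∃ w, g = PySem.Chars.rstrip g ++ w ∧ ∀ c ∈ w, PySem.Chars.isspace c = true := by
  refine ⟨(g.reverse.takeWhile PySem.Chars.isspace).reverse, ?_, ?_⟩
  · rw [PySem.Chars.rstrip, ← List.reverse_append, List.takeWhile_append_dropWhile]
    simp
  · intro c hc
    simp only [List.mem_reverse] at hc
    exact List.mem_takeWhile_imp hc

theorem strip_append_spaces (y w : List Char) (hw : ∀ c ∈ w, PySem.Chars.isspace c = true) :
    PySem.Chars.strip (y ++ w) = PySem.Chars.strip y := by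
  have hdw : w.dropWhile PySem.Chars.isspace = [] := List.dropWhile_eq_nil_iff.mpr (by
    intro c hc; simp [hw c hc])
  have hrw : ∀ z : List Char, PySem.Chars.rstrip (z ++ w) = PySem.Chars.rstrip z := by
    intro z
    rw [PySem.Chars.rstrip, PySem.Chars.rstrip, List.reverse_append, List.dropWhile_append]
    have : w.reverse.dropWhile PySem.Chars.isspace = [] := List.dropWhile_eq_nil_iff.mpr (by
      intro c hc; simp only [List.mem_reverse] at hc; simp [hw c hc])
    simp [this]
  rw [PySem.Chars.strip, PySem.Chars.strip, PySem.Chars.lstrip, PySem.Chars.lstrip,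
    List.dropWhile_append]
  by_cases hy : y.dropWhile PySem.Chars.isspace = []
  · simp [hy, hdw, PySem.Chars.rstrip]
  · simp only [List.isEmpty_iff, hy, if_false]
    exact hrw _

theorem cond_eq (g : List Char) :
    (PySem.Chars.startswith (PySem.Chars.upper (PySem.Chars.rstrip g)) cnPrefix = true)
      ↔ PySem.Chars.upper (g.take 3) = cnPrefix := by
  obtain ⟨w, hg, hw⟩ := rstrip_decomp g
  have hstart : ∀ y : List Char,
      (PySem.Chars.startswith (PySem.Chars.upper y) cnPrefix = true)
        ↔ PySem.Chars.upper (y.take 3) = cnPrefix := by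
    intro y
    rw [PySem.Chars.startswith_iff, List.prefix_iff_eq_take]
    constructor
    · intro h
      rw [PySem.Chars.upper, List.map_take]
      exact h.symm
    · intro h
      show cnPrefix = List.take 3 (List.map PySem.Chars.upperChar y)
      rw [← List.map_take]
      exact h.symm
  rw [hstart]
  by_cases h3 : 3 ≤ (PySem.Chars.rstrip g).length
  · have : g.take 3 = (PySem.Chars.rstrip g).take 3 := by
      conv_lhs => rw [hg]
      rw [List.take_append, Nat.sub_eq_zero_of_le h3]
      simp
    rw [this]
  · have hlt : (PySem.Chars.rstrip g).length < 3 := by omega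
    constructor
    · intro h
      have := congrArg List.length h
      simp [PySem.Chars.upper, cnPrefix] at this
      omega
    · intro h
      exfalso
      have hlen : (g.take 3).length = 3 := by
        have := congrArg List.length h
        simpa [PySem.Chars.upper, cnPrefix] using this
      have hx : (PySem.Chars.rstrip g).take 3 = PySem.Chars.rstrip g :=
        List.take_of_length_le (by omega)
      have hg3 : g.take 3 = PySem.Chars.rstrip g ++ w.take (3 - (PySem.Chars.rstrip g).length) := by
        conv_lhs => rw [hg]
        rw [List.take_append, hx]
      have h2lt : 2 < (g.take 3).length := by omega
      have hle : (PySem.Chars.rstrip g).length ≤ 2 := by omega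
      have hc2mem : (g.take 3)[2]'h2lt ∈ w := by
        rw [List.getElem_of_eq hg3 h2lt, List.getElem_append_right hle]
        exact List.mem_of_mem_take (List.getElem_mem _)
      have hsp := hw _ hc2mem
      have hup : PySem.Chars.upperChar ((g.take 3)[2]'h2lt) = '=' := by
        have hcg := congrArg (fun l => l[2]?) h
        simp [PySem.Chars.upper, cnPrefix] at hcg
        obtain ⟨a, ha, hua⟩ := hcg
        have h2g : 2 < g.length := by
          simp [List.length_take] at hlen; omega
        have hgeq : (g.take 3)[2]'h2lt = a := by
          rw [List.getElem_take]
          rw [List.getElem?_eq_getElem h2g] at ha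
          exact Option.some.inj ha
        rw [hgeq]; exact hua
      rw [upperChar_of_isspace _ hsp] at hup
      rw [hup] at hsp
      exact absurd hsp (by decide)

theorem val_eq (g : List Char)
    (h : PySem.Chars.startswith (PySem.Chars.upper (PySem.Chars.rstrip g)) cnPrefix = true) :
    PySem.Chars.strip ((PySem.Chars.rstrip g).drop 3) = PySem.Chars.strip (g.drop 3) := by
  have h3 : 3 ≤ (PySem.Chars.rstrip g).length := by
    rw [PySem.Chars.startswith_iff] at h
    have := h.length_le
    simpa [PySem.Chars.upper, cnPrefix] using this
  obtain ⟨w, hg, hw⟩ := rstrip_decomp g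
  have : g.drop 3 = (PySem.Chars.rstrip g).drop 3 ++ w := by
    conv_lhs => rw [hg]
    rw [List.drop_append, Nat.sub_eq_zero_of_le h3, List.drop_zero]
  rw [this, strip_append_spaces _ w hw]

theorem main_eq (n : Nat) : ∀ (l : List Char), l.length ≤ n →
    loopA (splitC (l.map subSlash)) = scanB l := by
  induction n with
  | zero =>
    intro l hl
    have : l = [] := List.length_eq_zero_iff.mp (Nat.le_zero.mp hl)
    subst this
    rw [scanB]
    simp [splitField, splitC, loopA, PySem.Chars.strip, PySem.Chars.lstrip, PySem.Chars.rstrip,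
      PySem.Chars.upper, PySem.Chars.startswith, cnPrefix]
  | succ n ih =>
    intro l hl
    rw [scanB]
    rw [splitC_eq (l.map subSlash), takeWhile_map_sub, dropWhile_map_sub,
      map_sub_id _ (fun c hc => List.mem_takeWhile_imp hc)]
    simp only [splitField_eq]
    have hstrip : PySem.Chars.strip (l.takeWhile notsep)
        = PySem.Chars.rstrip ((l.dropWhile PySem.Chars.isspace).takeWhile notsep) := by
      rw [PySem.Chars.strip, PySem.Chars.lstrip, lstrip_takeWhile]
    have hdnd : (l.dropWhile PySem.Chars.isspace).dropWhile notsep = l.dropWhile notsep :=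
      dropWhile_notsep_dropWhile_isspace l
    set gB := (l.dropWhile PySem.Chars.isspace).takeWhile notsep with hgB
    simp only [loopA, hstrip, hdnd]
    by_cases hc : PySem.Chars.upper (gB.take 3) = cnPrefix
    · rw [if_pos ((cond_eq gB).mpr hc), if_pos hc]
      congr 1
      rw [PySem.Chars.slice_eq_listSlice, PySem.List.slice_from _ (by omega)]
      show PySem.Chars.strip ((PySem.Chars.rstrip gB).drop ((3:Int).toNat)) = _
      rw [show ((3:Int).toNat) = 3 from rfl]
      exact val_eq gB ((cond_eq gB).mpr hc)
    · rw [if_neg (fun h => hc ((cond_eq gB).mp h)), if_neg hc]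
      cases hd : l.dropWhile notsep with
      | nil => simp [loopA]
      | cons d t₂ =>
        have hlen : t₂.length ≤ n := by
          have h1 : (l.dropWhile notsep).length ≤ l.length := List.length_dropWhile_le _ _
          rw [hd] at h1
          simp only [List.length_cons] at h1
          omega
        simp only [List.map_cons]
        rw [ih t₂ hlen]
        simp

-- ===== VERDICT (by name: the statement is the Claim_ definition above) =====
theorem extract_cn_from_subject_spec : Claim_equal_extract_cn_from_subject := by
  intro subject _
  unfold Spec_extract_cn_from_subject
  match subject with
  | none => rfl
  | some s =>
    simp only [extract_cn_from_subject, extract_cn_from_subject_alt]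
    by_cases h : s.toList.isEmpty
    · simp [h]
    · simp only [h, if_neg, Bool.false_eq_true, not_false_iff]
      rw [replace_eq, splitOn_eq, main_eq s.toList.length _ le_rfl]
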